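-- pv_equiv track=rewrite | github.com/Bkk3456/Bitwise_Insights | markov_huffman_visualizer.py | markov_huffman
-- ===== SOURCE A (Python) =====
-- import heapq
-- from collections import defaultdict, Counter
--
-- class Node:
--     def __init__(self, symbol=None, freq=0):
--         self.symbol = symbol
--         self.freq = freq
--         self.left = None
--         self.right = None
--
--     def __lt__(self, other):  # used by heapq for comparing nodes
--         return self.freq < other.freq
--
-- def build_huffman_tree(frequencies):
--     heap = [Node(sym, freq) for sym, freq in frequencies.items()]
--     heapq.heapify(heap)
--     while len(heap) > 1:
--         n1 = heapq.heappop(heap)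
--         n2 = heapq.heappop(heap)
--         merged = Node(None, n1.freq + n2.freq)
--         merged.left, merged.right = n1, n2
--         heapq.heappush(heap, merged)
--     return heap[0] if heap else None
--
-- def get_codes(node, prefix="", codebook=None):
--     if codebook is None:
--         codebook = {}
--
--     if node:
--         # Leaf node
--         if node.symbol is not None:
--             codebook[node.symbol] = prefix if prefix else "0"  # assign '0' if tree has only one symbol
--         else:
--             get_codes(node.left, prefix + "0", codebook)
--             get_codes(node.right, prefix + "1", codebook)
--     return codebook
--
-- def build_transition_matrix(data):
--     transitions = defaultdict(Counter)
--     for i in range(len(data) - 1):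
--         curr, next_ = data[i], data[i + 1]
--         transitions[curr][next_] += 1
--     return transitions
--
-- def markov_huffman(data):
--     transitions = build_transition_matrix(data)
--     total_bits = 0
--     codebooks = {}
--
--     for context, counter in transitions.items():
--         tree = build_huffman_tree(counter)
--         codes = get_codes(tree)
--         codebooks[context] = codes
--
--     for i in range(len(data) - 1):
--         curr, next_ = data[i], data[i + 1]
--         code = codebooks[curr][next_]
--         total_bits += len(code)
--
--     return total_bits, codebooks, transitions
-- ===== SOURCE B (Python) =====
-- import heapq
-- from collections import defaultdict, Counter
--
-- class Book:
--     """A heap item carrying a frequency and the (symbol, code) entries of its subtree;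
--     ordered by frequency only, like the original Node."""
--     def __init__(self, freq, entries):
--         self.freq = freq
--         self.entries = entries
--
--     def __lt__(self, other):
--         return self.freq < other.freq
--
-- def context_codes(counter):
--     # Huffman codes without ever materialising a tree: merging two heap items
--     # prepends '0' to the first item's codes and '1' to the second's.
--     heap = [Book(f, [(s, "")]) for s, f in counter.items()]
--     heapq.heapify(heap)
--     while len(heap) > 1:
--         a = heapq.heappop(heap)
--         b = heapq.heappop(heap)
--         heapq.heappush(heap, Book(a.freq + b.freq,
--             [(s, "0" + c) for s, c in a.entries] + [(s, "1" + c) for s, c in b.entries]))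
--     if not heap:
--         return {}
--     return {s: (c or "0") for s, c in heap[0].entries}
--
-- def markov_huffman(data):
--     transitions = defaultdict(Counter)
--     for curr, next_ in zip(data, data[1:]):
--         transitions[curr][next_] += 1
--     total_bits = 0
--     codebooks = {}
--     for context, counter in transitions.items():
--         codes = context_codes(counter)
--         codebooks[context] = codes
--         total_bits += sum(f * len(codes[s]) for s, f in counter.items())
--     return total_bits, codebooks, transitions
-- ===== Notes on version B (the rewrite author's own statement) =====
-- stated objective: alternative
-- what changed: B never builds a Huffman tree: each heap item carries its (symbol, code) entries and merging prepends '0'/'1' to them, so get_codes and the Node tree disappear; transitions come from zip(data, data[1:]) instead of an index loop, and total_bits is read off each context's counter (count * code length) instead of a second scan of data.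
import Mathlib
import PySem

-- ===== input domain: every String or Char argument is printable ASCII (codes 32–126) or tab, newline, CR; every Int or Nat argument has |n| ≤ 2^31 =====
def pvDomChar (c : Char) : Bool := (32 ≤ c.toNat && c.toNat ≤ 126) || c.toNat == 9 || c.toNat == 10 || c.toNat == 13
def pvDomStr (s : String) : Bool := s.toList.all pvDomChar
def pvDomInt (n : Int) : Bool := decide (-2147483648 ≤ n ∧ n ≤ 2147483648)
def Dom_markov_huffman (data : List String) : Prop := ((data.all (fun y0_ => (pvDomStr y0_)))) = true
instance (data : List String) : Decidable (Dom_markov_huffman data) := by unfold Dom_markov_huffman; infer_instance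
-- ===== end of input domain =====

-- B builds the Huffman codes with no tree at all: each heap item carries its (symbol, code)
-- entries and merging prepends '0'/'1'; transitions come from zipping data with its tail and
-- total_bits is read off each context's counter (objective: alternative decomposition).

-- ===== PORT A =====
-- Python's Node; HTree.nil plays None (left/right of a leaf, empty heap result).
inductive HTree where
  | nil : HTree
  | node : Option String → Int → HTree → HTree → HTree
deriving DecidableEq, Repr

def HTree.freq : HTree → Int
  | .nil => 0
  | .node _ f _ _ => f

-- CPython heapq._siftdown inner while-loop (hand-ported step for step; Node.__lt__ is freq <).
-- The fuel argument only makes the loop total: pos strictly decreases, so fuel = pos + 1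
-- (resp. endpos + 1, len(heap) below) is never exhausted and the loop runs exactly as in CPython.
def siftdownLoop : Nat → List HTree → Nat → Nat → HTree → List HTree × Nat
  | 0, heap, _, pos, _ => (heap, pos)
  | fuel + 1, heap, startpos, pos, newitem =>
    if startpos < pos then
      let parentpos := (pos - 1) / 2
      let parent := heap.getD parentpos .nil
      if newitem.freq < parent.freq then
        siftdownLoop fuel (heap.set pos parent) startpos parentpos newitem
      else (heap, pos)
    else (heap, pos)

-- CPython heapq._siftdown.
def siftdown (heap : List HTree) (startpos pos : Nat) : List HTree :=
  let newitem := heap.getD pos .nil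
  let r := siftdownLoop (pos + 1) heap startpos pos newitem
  r.1.set r.2 newitem

-- childpos correction in CPython heapq._siftup ('if rightpos < endpos and not heap[childpos] < heap[rightpos]')
def chooseChild (heap : List HTree) (endpos childpos : Nat) : Nat :=
  if childpos + 1 < endpos ∧
      ¬ ((heap.getD childpos .nil).freq < (heap.getD (childpos + 1) .nil).freq)
  then childpos + 1 else childpos

-- CPython heapq._siftup inner while-loop (childpos at least doubles, so fuel endpos + 1 never runs out).
def siftupLoop : Nat → List HTree → Nat → Nat → Nat → List HTree × Nat
  | 0, heap, _, _, pos => (heap, pos)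
  | fuel + 1, heap, endpos, childpos, pos =>
    if childpos < endpos then
      let c := chooseChild heap endpos childpos
      siftupLoop fuel (heap.set pos (heap.getD c .nil)) endpos (2 * c + 1) c
    else (heap, pos)

-- CPython heapq._siftup.
def siftup (heap : List HTree) (pos : Nat) : List HTree :=
  let endpos := heap.length
  let startpos := pos
  let newitem := heap.getD pos .nil
  let r := siftupLoop (endpos + 1) heap endpos (2 * pos + 1) pos
  siftdown (r.1.set r.2 newitem) startpos r.2

-- CPython heapq.heapify: for i in reversed(range(n//2)): _siftup(heap, i)
def heapifyPy (heap : List HTree) : List HTree :=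
  ((List.range (heap.length / 2)).reverse).foldl (fun h i => siftup h i) heap

-- CPython heapq.heappush.
def heappush (heap : List HTree) (item : HTree) : List HTree :=
  let heap2 := heap ++ [item]
  siftdown heap2 0 (heap2.length - 1)

-- CPython heapq.heappop; on the empty heap Python raises IndexError — unreachable at the
-- call sites (the loop guard ensures len(heap) > 1), the (.nil, []) branch is dead there.
def heappopD (heap : List HTree) : HTree × List HTree :=
  match heap.getLast? with
  | none => (.nil, [])
  | some lastelt =>
    match heap.dropLast with
    | [] => (lastelt, [])
    | r0 :: rest => (r0, siftup ((r0 :: rest).set 0 lastelt) 0)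

-- the while len(heap) > 1 loop of build_huffman_tree; each round removes one element,
-- so fuel = len(heap) is never exhausted
def huffLoop : Nat → List HTree → List HTree
  | 0, heap => heap
  | fuel + 1, heap =>
    if 1 < heap.length then
      let p1 := heappopD heap
      let p2 := heappopD p1.2
      huffLoop fuel (heappush p2.2 (HTree.node none (p1.1.freq + p2.1.freq) p1.1 p2.1))
    else heap

def buildHuffmanTree (frequencies : PySem.Dict String Int) : HTree :=
  let heap := frequencies.items.map (fun p => HTree.node (some p.1) p.2 .nil .nil)
  (huffLoop (heapifyPy heap).length (heapifyPy heap)).getD 0 .nil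

def getCodesAux : HTree → List Char → PySem.Dict String String → PySem.Dict String String
  | .nil, _, cb => cb
  | .node sym _ l r, pfx, cb =>
    match sym with
    | some s => cb.insert s (String.ofList (if pfx = [] then ['0'] else pfx))
    | none => getCodesAux r (pfx ++ ['1']) (getCodesAux l (pfx ++ ['0']) cb)

def getCodes (t : HTree) : PySem.Dict String String := getCodesAux t [] .empty

def buildTransitionMatrix (data : List String) : PySem.Dict String (PySem.Dict String Int) :=
  (PySem.List.pyRange 0 (PySem.List.len data - 1) 1).foldl
    (fun t i =>
      t.modify (PySem.List.pyGetD data i "") PySem.Dict.empty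
        (fun c => c.modify (PySem.List.pyGetD data (i + 1) "") 0 (· + 1)))
    PySem.Dict.empty

-- A: build codebooks context by context, then a second scan of data adds up the code
-- lengths.  codebooks[curr][next_] is ported with getD: both keys are always present
-- (every adjacent pair was entered into transitions), so Python never hits a KeyError.
def markov_huffman (data : List String) : Int × (List (String × List (String × String))) × (List (String × List (String × Int))) :=
  let transitions := buildTransitionMatrix data
  let codebooks := transitions.items.foldl
    (fun cb p => cb.insert p.1 (getCodes (buildHuffmanTree p.2))) PySem.Dict.empty
  let total_bits := (PySem.List.pyRange 0 (PySem.List.len data - 1) 1).foldl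
    (fun tb i =>
      tb + PySem.Str.len ((codebooks.getD (PySem.List.pyGetD data i "") PySem.Dict.empty).getD
            (PySem.List.pyGetD data (i + 1) "") ""))
    0
  (total_bits, codebooks.items.map (fun p => (p.1, p.2.items)),
   transitions.items.map (fun p => (p.1, p.2.items)))

-- ===== PORT B =====
-- B's Book: a frequency with the (symbol, reversed-growing code) entries of its subtree;
-- ordering uses only the frequency, exactly like Node.__lt__.
abbrev BItem := Int × List (String × List Char)

-- Source B relies on heapq over Book; CPython's _siftdown/_siftup are transcribed here for
-- Book items ((0, []) is the out-of-range default of getD, never read by a real run).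
def bUpLoop : Nat → List BItem → Nat → Nat → BItem → List BItem × Nat
  | 0, h, _, j, _ => (h, j)
  | f + 1, h, sp, j, it =>
    if sp < j then
      let pj := (j - 1) / 2
      let par := h.getD pj (0, [])
      if it.1 < par.1 then bUpLoop f (h.set j par) sp pj it
      else (h, j)
    else (h, j)

def bUp (h : List BItem) (sp j : Nat) : List BItem :=
  let it := h.getD j (0, [])
  let r := bUpLoop (j + 1) h sp j it
  r.1.set r.2 it

def bChild (h : List BItem) (e j : Nat) : Nat :=
  if j + 1 < e ∧ ¬ ((h.getD j (0, [])).1 < (h.getD (j + 1) (0, [])).1) then j + 1 else j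

def bDownLoop : Nat → List BItem → Nat → Nat → Nat → List BItem × Nat
  | 0, h, _, _, j => (h, j)
  | f + 1, h, e, cj, j =>
    if cj < e then
      let c := bChild h e cj
      bDownLoop f (h.set j (h.getD c (0, []))) e (2 * c + 1) c
    else (h, j)

def bSift (h : List BItem) (j : Nat) : List BItem :=
  let it := h.getD j (0, [])
  let r := bDownLoop (h.length + 1) h h.length (2 * j + 1) j
  bUp (r.1.set r.2 it) j r.2

def bHeapify (h : List BItem) : List BItem :=
  ((List.range (h.length / 2)).reverse).foldl bSift h

def bPush (h : List BItem) (it : BItem) : List BItem :=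
  let h2 := h ++ [it]
  bUp h2 0 (h2.length - 1)

def bPop (h : List BItem) : BItem × List BItem :=
  match h.getLast? with
  | none => ((0, []), [])
  | some last =>
    match h.dropLast with
    | [] => (last, [])
    | x :: xs => (x, bSift ((x :: xs).set 0 last) 0)

-- merging two Books: prepend '0' to the first item's codes and '1' to the second's
def bMerge (a b : BItem) : BItem :=
  (a.1 + b.1, a.2.map (fun e => (e.1, '0' :: e.2)) ++ b.2.map (fun e => (e.1, '1' :: e.2)))

def bLoop : Nat → List BItem → List BItem
  | 0, h => h
  | f + 1, h =>
    if 1 < h.length then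
      let p := bPop h
      let q := bPop p.2
      bLoop f (bPush q.2 (bMerge p.1 q.1))
    else h

-- context_codes of Source B: codes straight from the surviving Book's entries ('' becomes "0")
def contextCodes (ctr : PySem.Dict String Int) : PySem.Dict String String :=
  let h := bHeapify (ctr.items.map (fun p => (p.2, [(p.1, ([] : List Char))])))
  match bLoop h.length h with
  | [] => PySem.Dict.empty
  | it :: _ =>
    it.2.foldl
      (fun cb e => cb.insert e.1 (String.ofList (if e.2 = [] then ['0'] else e.2)))
      PySem.Dict.empty

-- B: transitions from zip(data, data[1:]); ONE loop over transitions.items() builds each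
-- codebook and adds count * len(code) off the counter; data is never scanned a second time.
def markov_huffman_alt (data : List String) : Int × (List (String × List (String × String))) × (List (String × List (String × Int))) :=
  let transitions := (data.zip data.tail).foldl
    (fun t p => t.modify p.1 PySem.Dict.empty (fun c => c.modify p.2 0 (· + 1)))
    PySem.Dict.empty
  let r := transitions.items.foldl
    (fun acc p =>
      let codes := contextCodes p.2
      (acc.1 + (p.2.items.map (fun q => q.2 * PySem.Str.len (codes.getD q.1 ""))).sum,
       acc.2.insert p.1 codes))
    ((0 : Int), PySem.Dict.empty)
  (r.1, r.2.items.map (fun p => (p.1, p.2.items)),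
   transitions.items.map (fun p => (p.1, p.2.items)))

-- ===== PRECONDITION & SPEC =====
def Spec_markov_huffman (data : List String) (out : Int × (List (String × List (String × String))) × (List (String × List (String × Int)))) : Prop := out = markov_huffman_alt data
instance (data : List String) (out : Int × (List (String × List (String × String))) × (List (String × List (String × Int)))) : Decidable (Spec_markov_huffman data out) := by
  unfold Spec_markov_huffman
  exact @instDecidableEqProd Int (List (String × List (String × String)) × List (String × List (String × Int)))
    inferInstance
    (@instDecidableEqProd (List (String × List (String × String))) (List (String × List (String × Int)))
      inferInstance inferInstance)
    out (markov_huffman_alt data)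

-- ===== CLAIM (what is proved, stated in full; the proofs are below) =====
def Claim_equal_markov_huffman : Prop := ∀ (data : List String), Dom_markov_huffman data → Spec_markov_huffman data (markov_huffman data)

-- ===== LEMMAS AND PROOFS =====

-- the (symbol, code) entries a subtree contributes, in get_codes's DFS order
def ent : HTree → List (String × List Char)
  | .nil => []
  | .node sym _ l r =>
    match sym with
    | some s => [(s, [])]
    | none => (ent l).map (fun e => (e.1, '0' :: e.2)) ++ (ent r).map (fun e => (e.1, '1' :: e.2))

-- the simulation map from A's Nodes to B's Books
def phi (t : HTree) : BItem := (t.freq, ent t)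

theorem phi_nil : phi .nil = ((0 : Int), ([] : List (String × List Char))) := rfl

theorem getD_map_phi (l : List HTree) (i : Nat) :
    (l.map phi).getD i (0, []) = phi (l.getD i .nil) := by
  simp [List.getD, List.getElem?_map, ← phi_nil, Option.getD_map]

theorem bUpLoop_phi (f : Nat) :
    ∀ (heap : List HTree) (sp j : Nat) (it : HTree),
      bUpLoop f (heap.map phi) sp j (phi it)
        = ((siftdownLoop f heap sp j it).1.map phi, (siftdownLoop f heap sp j it).2) := by
  induction f with
  | zero => intro heap sp j it; rfl
  | succ f ih =>
    intro heap sp j it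
    simp only [bUpLoop, siftdownLoop, getD_map_phi,
      show ∀ t : HTree, (phi t).1 = t.freq from fun _ => rfl]
    split_ifs with h1 h2
    · rw [← List.map_set, ih]
    · rfl
    · rfl

theorem bUp_phi (heap : List HTree) (sp j : Nat) :
    bUp (heap.map phi) sp j = (siftdown heap sp j).map phi := by
  unfold bUp siftdown
  dsimp only
  rw [getD_map_phi, bUpLoop_phi]
  simp [List.map_set]

theorem bChild_phi (heap : List HTree) (e j : Nat) :
    bChild (heap.map phi) e j = chooseChild heap e j := by
  unfold bChild chooseChild
  rw [getD_map_phi, getD_map_phi]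
  simp only [show ∀ t : HTree, (phi t).1 = t.freq from fun _ => rfl]

theorem bDownLoop_phi (f : Nat) :
    ∀ (heap : List HTree) (e cj j : Nat),
      bDownLoop f (heap.map phi) e cj j
        = ((siftupLoop f heap e cj j).1.map phi, (siftupLoop f heap e cj j).2) := by
  induction f with
  | zero => intro heap e cj j; rfl
  | succ f ih =>
    intro heap e cj j
    simp only [bDownLoop, siftupLoop]
    split_ifs with h1
    · rw [bChild_phi, getD_map_phi, ← List.map_set, ih]
    · rfl

theorem bSift_phi (heap : List HTree) (j : Nat) :
    bSift (heap.map phi) j = (siftup heap j).map phi := by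
  unfold bSift siftup
  dsimp only
  rw [List.length_map, getD_map_phi, bDownLoop_phi]
  simp only [← List.map_set]
  exact bUp_phi _ j _

theorem bHeapify_phi (heap : List HTree) :
    bHeapify (heap.map phi) = (heapifyPy heap).map phi := by
  unfold bHeapify heapifyPy
  rw [List.length_map]
  generalize (List.range (heap.length / 2)).reverse = idxs
  induction idxs generalizing heap with
  | nil => rfl
  | cons i is ih =>
    simp only [List.foldl_cons]
    rw [bSift_phi, ih]

theorem bPush_phi (heap : List HTree) (it : HTree) :
    bPush (heap.map phi) (phi it) = (heappush heap it).map phi := by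
  unfold bPush heappush
  dsimp only
  rw [show (heap.map phi) ++ [phi it] = (heap ++ [it]).map phi by simp]
  rw [List.length_map, bUp_phi]

theorem bPop_phi (heap : List HTree) :
    bPop (heap.map phi) = (phi (heappopD heap).1, (heappopD heap).2.map phi) := by
  unfold bPop heappopD
  rw [List.getLast?_map, ← List.map_dropLast]
  cases hl : heap.getLast? with
  | none => rfl
  | some last =>
    simp only [Option.map_some]
    cases hd : heap.dropLast with
    | nil => rfl
    | cons x xs =>
      simp only [List.map_cons]
      rw [show (phi x :: xs.map phi).set 0 (phi last) = ((x :: xs).set 0 last).map phi by simp,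
        bSift_phi]

theorem bMerge_phi (a b : HTree) :
    bMerge (phi a) (phi b) = phi (HTree.node none (a.freq + b.freq) a b) := rfl

theorem bLoop_phi (f : Nat) :
    ∀ heap : List HTree, bLoop f (heap.map phi) = (huffLoop f heap).map phi := by
  induction f with
  | zero => intro heap; rfl
  | succ f ih =>
    intro heap
    simp only [bLoop, huffLoop, List.length_map]
    split_ifs with h1
    · rw [bPop_phi]
      simp only []
      rw [bPop_phi, bMerge_phi, bPush_phi, ih]
    · rfl

-- get_codes as a left fold over the entries of the tree
theorem getCodesAux_ent (t : HTree) :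
    ∀ (pfx : List Char) (cb : PySem.Dict String String),
      getCodesAux t pfx cb
        = (ent t).foldl
            (fun cb e => cb.insert e.1
              (String.ofList (if pfx ++ e.2 = [] then ['0'] else pfx ++ e.2))) cb := by
  induction t with
  | nil => intro pfx cb; rfl
  | node sym f l r ihl ihr =>
    intro pfx cb
    cases sym with
    | some s => simp [getCodesAux, ent]
    | none =>
      simp only [getCodesAux, ent, List.foldl_append, List.foldl_map]
      rw [ihl, ihr]
      simp only [← List.append_cons]

-- B's per-context codebook is exactly A's tree-then-get_codes codebook
theorem contextCodes_eq (ctr : PySem.Dict String Int) :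
    contextCodes ctr = getCodes (buildHuffmanTree ctr) := by
  unfold contextCodes buildHuffmanTree getCodes
  dsimp only
  have hmap : ctr.items.map (fun p => ((p.2 : Int), [(p.1, ([] : List Char))]))
      = (ctr.items.map (fun p => HTree.node (some p.1) p.2 .nil .nil)).map phi := by
    rw [List.map_map]; rfl
  rw [hmap, bHeapify_phi, List.length_map, bLoop_phi]
  cases hres : huffLoop (heapifyPy (ctr.items.map (fun p => HTree.node (some p.1) p.2 .nil .nil))).length
      (heapifyPy (ctr.items.map (fun p => HTree.node (some p.1) p.2 .nil .nil))) with
  | nil => rfl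
  | cons h rest =>
    simp only [List.map_cons, List.getD_cons_zero]
    rw [getCodesAux_ent]
    simp
    rfl

-- the transition-counting step, on an adjacent pair
def nstep (t : PySem.Dict String (PySem.Dict String Int)) (p : String × String) :
    PySem.Dict String (PySem.Dict String Int) :=
  t.modify p.1 PySem.Dict.empty (fun c => c.modify p.2 0 (· + 1))

-- an index loop over range(len(xs)-1) reading xs[i], xs[i+1] is a fold over the adjacent pairs
theorem range_pairs_foldl {γ : Type} (step : γ → String → String → γ) :
    ∀ (xs : List String) (init : γ),
    (List.range (xs.length - 1)).foldl (fun a k => step a (xs.getD k "") (xs.getD (k + 1) "")) init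
      = (xs.zip xs.tail).foldl (fun a p => step a p.1 p.2) init := by
  intro xs
  induction xs with
  | nil => intro init; simp
  | cons x xs ih =>
    intro init
    cases xs with
    | nil => simp
    | cons y t =>
      have hlen : (x :: y :: t).length - 1 = t.length + 1 := by simp
      rw [hlen, List.range_succ_eq_map]
      simp only [List.foldl_cons, List.foldl_map, Nat.succ_eq_add_one, List.getD_cons_succ,
        List.getD_cons_zero, List.zip_cons_cons, List.tail_cons]
      have := ih (step init x y)
      simpa using this

-- the pyRange/pyGetD form of the same loop
theorem pyRange_len_foldl {γ : Type} (xs : List String) (step : γ → String → String → γ)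
    (init : γ) :
    (PySem.List.pyRange 0 (PySem.List.len xs - 1) 1).foldl
        (fun a i => step a (PySem.List.pyGetD xs i "") (PySem.List.pyGetD xs (i + 1) "")) init
      = (List.range (xs.length - 1)).foldl
          (fun a k => step a (xs.getD k "") (xs.getD (k + 1) "")) init := by
  cases xs with
  | nil =>
    rw [show PySem.List.len ([] : List String) - 1 = (-1 : Int) by simp [PySem.List.len_eq]]
    rw [PySem.List.pyRange_one_eq_nil (by norm_num)]
    simp
  | cons x t =>
    rw [show PySem.List.len (x :: t) - 1 = ((t.length : Nat) : Int) by
      simp [PySem.List.len_eq]]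
    rw [PySem.List.pyRange_zero_nat, List.foldl_map]
    have hlen : (x :: t).length - 1 = t.length := by simp
    rw [hlen]
    congr 1
    funext a k
    have h1 : ((k : Int) + 1) = ((k + 1 : Nat) : Int) := by push_cast; ring
    simp only [h1, PySem.List.pyGetD_natCast]

-- sum over a Nodup list of a function changed at exactly one member
theorem sum_map_update {α : Type} [DecidableEq α] :
    ∀ (K : List α) (f f' : α → Int) (x : α) (d : Int), K.Nodup → x ∈ K →
      (∀ s ∈ K, s ≠ x → f' s = f s) → f' x = f x + d →
      (K.map f').sum = (K.map f).sum + d := by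
  intro K
  induction K with
  | nil => simp
  | cons k K ih =>
    intro f f' x d hnd hx hne hfx
    simp only [List.map_cons, List.sum_cons]
    rcases List.mem_cons.mp hx with rfl | hx'
    · have hmap : K.map f' = K.map f :=
        List.map_congr_left (fun s hs =>
          hne s (List.mem_cons_of_mem _ hs) (fun e => (List.nodup_cons.mp hnd).1 (e ▸ hs)))
      rw [hmap, hfx]; ring
    · have hk : k ≠ x := fun e => (List.nodup_cons.mp hnd).1 (e ▸ hx')
      rw [hne k (List.mem_cons_self ..) hk,
        ih f f' x d (List.nodup_cons.mp hnd).2 hx' (fun s hs => hne s (List.mem_cons_of_mem _ hs)) hfx]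
      ring

-- Σ_{s ∈ set(l)} count(l,s) * h s = Σ_{x ∈ l} h x
theorem sum_count_mul (l : List String) (h : String → Int) :
    ((PySem.Set.ofList l).map (fun s => (l.count s : Int) * h s)).sum = (l.map h).sum := by
  induction l using List.reverseRecOn with
  | nil => simp [PySem.Set.ofList]
  | append_singleton l x ih =>
    rw [PySem.Set.ofList_append_singleton]
    by_cases hx : x ∈ PySem.Set.ofList l
    · rw [PySem.Set.add_of_mem hx]
      have hupd := sum_map_update (PySem.Set.ofList l)
        (fun s => (l.count s : Int) * h s)
        (fun s => ((l ++ [x]).count s : Int) * h s) x (h x)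
        (PySem.Set.nodup_ofList l) hx
        (fun s _ hs => by
          simp [List.count_append, List.count_singleton]
          exact Or.inl (fun e => hs e.symm))
        (by simp [List.count_append]; ring)
      rw [hupd, ih]
      simp
    · rw [PySem.Set.add_of_not_mem hx]
      have hxl : x ∉ l := fun e => hx ((PySem.Set.mem_ofList l x).mpr e)
      rw [List.map_append, List.sum_append]
      have hmap : (PySem.Set.ofList l).map (fun s => ((l ++ [x]).count s : Int) * h s)
          = (PySem.Set.ofList l).map (fun s => (l.count s : Int) * h s) :=
        List.map_congr_left (fun s hs => by
          have hsx : s ≠ x := fun e => hx (e ▸ hs)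
          simp [List.count_append, List.count_singleton]
          exact Or.inl (fun e => hsx e.symm))
      rw [hmap, ih]
      simp [List.count_append, List.count_eq_zero_of_not_mem hxl]

-- Σ_{c ∈ set(firsts P)} Σ_{p ∈ P, p.1 = c} h p = Σ_{p ∈ P} h p
theorem sum_group_by_fst (P : List (String × String)) (h : String × String → Int) :
    ((PySem.Set.ofList (P.map (·.1))).map
        (fun c => ((P.filter (fun p => p.1 == c)).map h).sum)).sum
      = (P.map h).sum := by
  induction P using List.reverseRecOn with
  | nil => simp [PySem.Set.ofList]
  | append_singleton P p ih =>
    rw [List.map_append]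
    simp only [List.map_cons, List.map_nil]
    rw [PySem.Set.ofList_append_singleton]
    by_cases hp : p.1 ∈ PySem.Set.ofList (P.map (·.1))
    · rw [PySem.Set.add_of_mem hp]
      have hupd := sum_map_update (PySem.Set.ofList (P.map (·.1)))
        (fun c => ((P.filter (fun q => q.1 == c)).map h).sum)
        (fun c => (((P ++ [p]).filter (fun q => q.1 == c)).map h).sum) p.1 (h p)
        (PySem.Set.nodup_ofList _) hp
        (fun c _ hc => by
          simp [List.filter_append, show (p.1 == c) = false by simpa using (Ne.symm hc)])
        (by simp [List.filter_append])
      rw [hupd, ih]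
      simp
    · rw [PySem.Set.add_of_not_mem hp]
      have hpf : p.1 ∉ P.map (·.1) := fun e => hp ((PySem.Set.mem_ofList _ _).mpr e)
      rw [List.map_append, List.sum_append]
      have hmap : (PySem.Set.ofList (P.map (·.1))).map
            (fun c => (((P ++ [p]).filter (fun q => q.1 == c)).map h).sum)
          = (PySem.Set.ofList (P.map (·.1))).map
            (fun c => ((P.filter (fun q => q.1 == c)).map h).sum) :=
        List.map_congr_left (fun c hc => by
          have hcx : p.1 ≠ c := fun e => hp (e ▸ hc)
          simp [List.filter_append, show (p.1 == c) = false by simpa using hcx])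
      have hnil : P.filter (fun q => q.1 == p.1) = [] := by
        apply List.filter_eq_nil_iff.mpr
        intro q hq
        simp only [beq_iff_eq]
        intro e
        exact hpf (List.mem_map.mpr ⟨q, hq, e⟩)
      rw [hmap, ih]
      simp [List.filter_append, hnil]

-- the inner counter of the nested transition dict is a Counter of the seconds of the matching pairs
theorem getD_nested (P : List (String × String)) (c : String) :
    ∀ t, ((P.foldl nstep t).getD c PySem.Dict.empty)
      = ((P.filter (fun p => p.1 == c)).map (·.2)).foldl
          (fun d x => d.modify x 0 (· + 1)) (t.getD c PySem.Dict.empty) := by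
  induction P with
  | nil => intro t; simp
  | cons p P ih =>
    intro t
    simp only [List.foldl_cons]
    by_cases hc : p.1 = c
    · rw [ih, show nstep t p = t.modify p.1 PySem.Dict.empty (fun cc => cc.modify p.2 0 (· + 1)) from rfl,
        hc, PySem.Dict.getD_modify_self]
      simp [hc]
    · rw [ih, show nstep t p = t.modify p.1 PySem.Dict.empty (fun cc => cc.modify p.2 0 (· + 1)) from rfl,
        PySem.Dict.getD_modify_of_ne _ _ _ (by exact fun e => hc e.symm)]
      simp [hc]

theorem keys_nested (P : List (String × String)) :
    (P.foldl nstep PySem.Dict.empty).keys = PySem.Set.ofList (P.map (·.1)) := by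
  have := PySem.Dict.keys_foldl_modify_key P Prod.fst PySem.Dict.empty
    (fun _ p => fun (cc : PySem.Dict String Int) => cc.modify p.2 0 (· + 1)) PySem.Dict.empty
  rw [PySem.Dict.keys_empty, PySem.Set.update_nil_left] at this
  exact this

theorem nodup_keys_nested (P : List (String × String)) :
    (P.foldl nstep PySem.Dict.empty).keys.Nodup := by
  have := PySem.Dict.nodup_keys_foldl_modify_key P Prod.fst PySem.Dict.empty
    (fun _ p => fun (cc : PySem.Dict String Int) => cc.modify p.2 0 (· + 1)) PySem.Dict.empty PySem.Dict.nodup_keys_empty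
  exact this

-- THE COUNTING IDENTITY: summing count * g over the nested counters is summing g over the pairs
theorem counting (P : List (String × String)) (g : String → String → Int) :
    (((P.foldl nstep PySem.Dict.empty).items).map
        (fun e => (e.2.items.map (fun q => q.2 * g e.1 q.1)).sum)).sum
      = (P.map (fun p => g p.1 p.2)).sum := by
  rw [PySem.Dict.items_eq_map_keys _ (nodup_keys_nested P) PySem.Dict.empty, keys_nested,
    List.map_map]
  have hterm : ∀ k ∈ PySem.Set.ofList (P.map (·.1)),
      ((fun e => (e.2.items.map (fun q => q.2 * g e.1 q.1)).sum) ∘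
        (fun k => (k, (P.foldl nstep PySem.Dict.empty).getD k PySem.Dict.empty))) k
        = ((P.filter (fun p => p.1 == k)).map (fun p => g p.1 p.2)).sum := by
    intro k _
    have hctr : (P.foldl nstep PySem.Dict.empty).getD k PySem.Dict.empty
        = PySem.Dict.counter ((P.filter (fun p => p.1 == k)).map (·.2)) := by
      rw [getD_nested, PySem.Dict.counter_eq_foldl, PySem.Dict.getD_empty]
    simp only [Function.comp_apply, hctr, PySem.Dict.items_counter, List.map_map,
      Function.comp_def]
    rw [sum_count_mul ((P.filter (fun p => p.1 == k)).map (·.2)) (g k), List.map_map]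
    apply congrArg
    apply List.map_congr_left
    intro p hp
    have : p.1 = k := by simpa using (List.mem_filter.mp hp).2
    simp [this]
  rw [List.map_congr_left hterm]
  exact sum_group_by_fst P (fun p => g p.1 p.2)

-- A's codebooks dict: getD at a key of transitions is that context's codebook
theorem codebooks_getD (T : PySem.Dict String (PySem.Dict String Int)) (hknd : T.keys.Nodup) :
    ∀ e ∈ T.items,
      (T.items.foldl (fun cb p => cb.insert p.1 (getCodes (buildHuffmanTree p.2)))
          PySem.Dict.empty).getD e.1 PySem.Dict.empty
        = getCodes (buildHuffmanTree e.2) := by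
  have hnodupfst : (T.items.map Prod.fst).Nodup := by
    simpa [PySem.Dict.keys] using hknd
  have hitems : (T.items.foldl (fun cb p => cb.insert p.1 (getCodes (buildHuffmanTree p.2)))
        PySem.Dict.empty).items
      = T.items.map (fun p => (p.1, getCodes (buildHuffmanTree p.2))) := by
    have := PySem.Dict.items_foldl_insert_fresh T.items Prod.fst
      (fun p => getCodes (buildHuffmanTree p.2)) PySem.Dict.empty
      (fun a _ => by simp [PySem.Dict.contains_empty]) hnodupfst
    simpa using this
  intro e he
  have hCBkeys : (T.items.foldl (fun cb p => cb.insert p.1 (getCodes (buildHuffmanTree p.2)))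
        PySem.Dict.empty).keys.Nodup := by
    simp only [PySem.Dict.keys, hitems, List.map_map]
    simpa [Function.comp_def] using hnodupfst
  exact PySem.Dict.getD_of_mem_items _
    (by rw [hitems]; exact List.mem_map.mpr ⟨e, he, rfl⟩) hCBkeys PySem.Dict.empty

-- ===== VERDICT (by name: the statement is the Claim_ definition above) =====
theorem markov_huffman_spec : Claim_equal_markov_huffman := by
  intro data _
  unfold Spec_markov_huffman markov_huffman markov_huffman_alt
  dsimp only []
  simp only [show ∀ c, contextCodes c = getCodes (buildHuffmanTree c) from contextCodes_eq]
  have hsplit := PySem.List.foldl_prod_mk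
    (f := fun tb (p : String × PySem.Dict String Int) => tb +
      ((p.2.items.map (fun q => q.2 *
        PySem.Str.len ((getCodes (buildHuffmanTree p.2)).getD q.1 ""))).sum))
    (g := fun (cb : PySem.Dict String (PySem.Dict String String))
        (p : String × PySem.Dict String Int) =>
      cb.insert p.1 (getCodes (buildHuffmanTree p.2)))
    (((data.zip data.tail).foldl nstep PySem.Dict.empty).items) (0 : Int) PySem.Dict.empty
  beta_reduce at hsplit
  have hT : buildTransitionMatrix data = (data.zip data.tail).foldl nstep PySem.Dict.empty := by
    have e1 := pyRange_len_foldl data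
      (fun t a b => t.modify a PySem.Dict.empty (fun c => c.modify b 0 (· + 1)))
      (PySem.Dict.empty : PySem.Dict String (PySem.Dict String Int))
    have e2 := range_pairs_foldl
      (fun t a b => t.modify a PySem.Dict.empty (fun c => c.modify b 0 (· + 1))) data
      (PySem.Dict.empty : PySem.Dict String (PySem.Dict String Int))
    beta_reduce at e1 e2
    unfold buildTransitionMatrix
    rw [e1, e2]
    rfl
  rw [show (data.zip data.tail).foldl
        (fun t p => t.modify p.1 PySem.Dict.empty (fun c => c.modify p.2 0 (· + 1)))
        PySem.Dict.empty = (data.zip data.tail).foldl nstep PySem.Dict.empty from rfl]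
  rw [hsplit, ← hT]
  have hknd : (buildTransitionMatrix data).keys.Nodup := by
    rw [hT]; exact nodup_keys_nested _
  refine Prod.ext ?_ (Prod.ext rfl rfl)
  show _ = ((buildTransitionMatrix data).items.foldl _ 0, _).1
  simp only
  -- the A-side second scan, as a sum over the adjacent pairs
  have e3 := pyRange_len_foldl data
    (fun tb a b => tb + PySem.Str.len
      ((((buildTransitionMatrix data).items.foldl
          (fun cb p => cb.insert p.1 (getCodes (buildHuffmanTree p.2)))
          PySem.Dict.empty).getD a PySem.Dict.empty).getD b "")) (0 : Int)
  have e4 := range_pairs_foldl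
    (fun tb a b => tb + PySem.Str.len
      ((((buildTransitionMatrix data).items.foldl
          (fun cb p => cb.insert p.1 (getCodes (buildHuffmanTree p.2)))
          PySem.Dict.empty).getD a PySem.Dict.empty).getD b "")) data (0 : Int)
  have e5 := PySem.List.foldl_add (data.zip data.tail)
    (fun p : String × String => PySem.Str.len
      ((((buildTransitionMatrix data).items.foldl
          (fun cb p => cb.insert p.1 (getCodes (buildHuffmanTree p.2)))
          PySem.Dict.empty).getD p.1 PySem.Dict.empty).getD p.2 ""))
    0
  have e6 := PySem.List.foldl_add ((buildTransitionMatrix data).items)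
    (fun p : String × PySem.Dict String Int =>
      ((p.2.items.map (fun q => q.2 *
        PySem.Str.len ((getCodes (buildHuffmanTree p.2)).getD q.1 ""))).sum)) 0
  beta_reduce at e3 e4 e5 e6
  rw [e3, e4, e5, e6, zero_add, zero_add]
  have hcong : (buildTransitionMatrix data).items.map
        (fun p : String × PySem.Dict String Int =>
          ((p.2.items.map (fun q => q.2 *
            PySem.Str.len ((getCodes (buildHuffmanTree p.2)).getD q.1 ""))).sum))
      = (buildTransitionMatrix data).items.map
        (fun e => (e.2.items.map (fun q => q.2 *
          PySem.Str.len ((((buildTransitionMatrix data).items.foldl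
            (fun cb p => cb.insert p.1 (getCodes (buildHuffmanTree p.2)))
            PySem.Dict.empty).getD e.1 PySem.Dict.empty).getD q.1 ""))).sum) := by
    apply List.map_congr_left
    intro e he
    rw [codebooks_getD (buildTransitionMatrix data) hknd e he]
  rw [hcong]
  have := counting (data.zip data.tail)
    (fun a b => PySem.Str.len
      ((((buildTransitionMatrix data).items.foldl
          (fun cb p => cb.insert p.1 (getCodes (buildHuffmanTree p.2)))
          PySem.Dict.empty).getD a PySem.Dict.empty).getD b ""))
  rw [← hT] at this
  rw [this]
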